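-- pv_equiv track=rewrite | github.com/good-mouse/game | verification.py | attempts
-- ===== SOURCE A (Python) =====
-- def attempts (min, max):
-- 	a = 0
-- 	current = 0
-- 	while True:
-- 		a += 1
-- 		if min == max - 1 : return a + 1
-- 		elif min == max :return a
-- 		else :
-- 			current = (min + max) // 2
-- 			max = current - 1
-- ===== SOURCE B (Python) =====
-- def attempts(min, max):
--     # Closed form: each loop iteration of A maps e = max - min + 2 to e // 2
--     # and stops when e is 2 (return count) or 3 (return count + 1), so the
--     # answer is (bit_length(e) - 2) + 1 + the second-highest bit of e.
--     e = max - min + 2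
--     k = e.bit_length() - 2
--     return k + 1 + ((e >> k) & 1)
-- ===== Notes on version B (the rewrite author's own statement) =====
-- stated objective: alternative
-- what changed: Replaces A's halving while-loop with a closed form: with e = max - min + 2 each iteration halves e, so the count is bit_length(e) - 1 plus the second-highest bit of e (O(1) arithmetic instead of the loop).
import Mathlib
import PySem

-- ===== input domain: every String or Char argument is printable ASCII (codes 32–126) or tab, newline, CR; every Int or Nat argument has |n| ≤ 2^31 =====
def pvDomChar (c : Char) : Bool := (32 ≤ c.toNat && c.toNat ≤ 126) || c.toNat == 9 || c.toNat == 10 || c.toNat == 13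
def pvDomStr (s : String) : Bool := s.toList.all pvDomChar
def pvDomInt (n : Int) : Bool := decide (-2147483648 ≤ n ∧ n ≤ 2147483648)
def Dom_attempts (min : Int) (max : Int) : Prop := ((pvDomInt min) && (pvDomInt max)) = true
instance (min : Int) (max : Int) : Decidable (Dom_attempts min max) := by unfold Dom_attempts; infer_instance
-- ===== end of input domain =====

-- B replaces A's halving while-loop with a closed form via bit_length (objective: alternative).
-- Python A loops forever when max < min; Pre_ excludes that. A's Lean port uses a fuel counter that is
-- sufficient on Pre_ (fuel exhaustion returns 0, outside any claim).

-- ===== PORT A =====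
-- the 'while True' loop of A, step for step, with state (a, min, max); fuel bounds the iterations
def attemptsLoopA (fuel : Nat) (a : Int) (min : Int) (max : Int) : Int :=
  match fuel with
  | 0 => 0
  | f + 1 =>
    let a := a + 1
    if min = max - 1 then a + 1
    else if min = max then a
    else
      let current := PySem.Int.floordiv (min + max) 2
      attemptsLoopA f a min (current - 1)

def attempts (min : Int) (max : Int) : Int :=
  attemptsLoopA ((max - min).toNat + 1) 0 min max

-- ===== PORT B =====
-- closed form of Source B; e.bit_length() is ported as Nat.log2 e.toNat + 1 (exact for e ≥ 1,
-- which Pre_ guarantees since e = max - min + 2 ≥ 2), and (e >> k) & 1 as (e.toNat >>> k) % 2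
def attempts_alt (min : Int) (max : Int) : Int :=
  let e : Int := max - min + 2
  let k : Nat := Nat.log2 e.toNat + 1 - 2
  (k : Int) + 1 + (((e.toNat >>> k) % 2 : Nat) : Int)

-- ===== PRECONDITION & SPEC =====
-- Pre_ excludes max < min, where Python A loops forever (no return value exists to match).
def Pre_attempts (min : Int) (max : Int) : Prop := min ≤ max
instance (min : Int) (max : Int) : Decidable (Pre_attempts min max) := by unfold Pre_attempts; infer_instance
def pvWitness_attempts : Int × Int := (0, 100)

def Spec_attempts (min : Int) (max : Int) (out : Int) : Prop := out = attempts_alt min max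
instance (min : Int) (max : Int) (out : Int) : Decidable (Spec_attempts min max out) := by unfold Spec_attempts; infer_instance

-- ===== CLAIM (what is proved, stated in full; the proofs are below) =====
def Claim_equal_attempts : Prop := ∀ (min : Int) (max : Int), Dom_attempts min max → Pre_attempts min max → Spec_attempts min max (attempts min max)

-- ===== LEMMAS AND PROOFS =====

-- the closed form as a function of d = max - min (a Nat), with e = d + 2
def gClosed (d : Nat) : Int :=
  ((Nat.log2 (d + 2) + 1 - 2 : Nat) : Int) + 1
    + ((((d + 2) >>> (Nat.log2 (d + 2) + 1 - 2)) % 2 : Nat) : Int)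

theorem attempts_alt_eq_gClosed (min max : Int) (h : min ≤ max) :
    attempts_alt min max = gClosed (max - min).toNat := by
  have he : (max - min + 2).toNat = (max - min).toNat + 2 := by omega
  simp only [attempts_alt, gClosed, he]

theorem log2_step (n : Nat) (h : 2 ≤ n) : Nat.log2 n = Nat.log2 (n / 2) + 1 := by
  rw [Nat.log2_eq_log_two, Nat.log2_eq_log_two, Nat.log_div_base]
  rw [Nat.sub_add_cancel (Nat.succ_le_of_lt (Nat.log_pos Nat.one_lt_two h))]

theorem one_le_log2 (n : Nat) (h : 2 ≤ n) : 1 ≤ Nat.log2 n := by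
  rw [log2_step n h]; omega

-- halving step of the closed form
theorem gClosed_step (d : Nat) (h : 2 ≤ d) : gClosed d = 1 + gClosed (d / 2 - 1) := by
  have hhalf : d / 2 - 1 + 2 = (d + 2) / 2 := by omega
  have hlog : Nat.log2 (d + 2) = Nat.log2 ((d + 2) / 2) + 1 := log2_step (d + 2) (by omega)
  simp only [gClosed, hhalf, hlog]
  generalize hM : Nat.log2 ((d + 2) / 2) = m
  have hm1 : 1 ≤ m := by rw [← hM]; exact one_le_log2 _ (by omega)
  have e1 : m + 1 + 1 - 2 = m := by omega
  have e2 : m + 1 - 2 = m - 1 := by omega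
  rw [e1, e2]
  have hshift : (d + 2) >>> m = ((d + 2) / 2) >>> (m - 1) := by
    rw [Nat.shiftRight_eq_div_pow, Nat.shiftRight_eq_div_pow, Nat.div_div_eq_div_mul]
    congr 1
    have h2 : 2 * 2 ^ (m - 1) = 2 ^ (m - 1 + 1) := (pow_succ' 2 (m - 1)).symm
    rw [h2]; congr 1; omega
  rw [hshift]
  omega

-- A's loop computes a plus the closed form, given enough fuel
theorem attemptsLoopA_eq (f : Nat) : ∀ (a min max : Int), min ≤ max → (max - min).toNat < f →
    attemptsLoopA f a min max = a + gClosed (max - min).toNat := by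
  induction f with
  | zero => intro a min max _ h; omega
  | succ f ih =>
    intro a min max hle hf
    simp only [attemptsLoopA]
    by_cases h1 : min = max - 1
    · have hd : (max - min).toNat = 1 := by omega
      have hg : gClosed 1 = 2 := by decide
      rw [if_pos h1, hd, hg]; ring
    · by_cases h2 : min = max
      · have hd : (max - min).toNat = 0 := by omega
        have hg : gClosed 0 = 1 := by decide
        rw [if_neg h1, if_pos h2, hd, hg]
      · rw [if_neg h1, if_neg h2]
        have hfd : PySem.Int.floordiv (min + max) 2 = (min + max) / 2 :=
          PySem.Int.floordiv_eq_ediv_of_pos (by omega)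
        rw [hfd]
        have hle' : min ≤ (min + max) / 2 - 1 := by omega
        have hlt' : ((min + max) / 2 - 1 - min).toNat < f := by omega
        have hd' : ((min + max) / 2 - 1 - min).toNat = (max - min).toNat / 2 - 1 := by omega
        rw [ih (a + 1) min _ hle' hlt', hd',
            gClosed_step (max - min).toNat (by omega)]
        ring

-- ===== VERDICT (by name: the statement is the Claim_ definition above) =====
theorem attempts_spec : Claim_equal_attempts := by
  intro min max _ hpre
  unfold Spec_attempts attempts
  rw [attempts_alt_eq_gClosed min max hpre,
      attemptsLoopA_eq ((max - min).toNat + 1) 0 min max hpre (by omega)]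
  ring
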